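-- pv_equiv track=rewrite | github.com/jugemu373/skil_check | skil_check_B/b096.py | calculate_blast_cells
-- ===== SOURCE A (Python) =====
-- def calculate_blast_cells(H, W, field):
--     bomb_rows = set()
--     bomb_cols = set()
--
--     for i in range(H):
--         for j in range(W):
--             if field[i][j] == '#':
--                 bomb_rows.add(i)
--                 bomb_cols.add(j)
--
--     return len(bomb_rows) * W + len(bomb_cols) * H - len(bomb_rows) * len(bomb_cols)
-- ===== SOURCE B (Python) =====
-- def calculate_blast_cells(H, W, field):
--     if H <= 0 or W <= 0:
--         return 0
--     c = sum(1 for j in range(W) if any(field[i][j] == '#' for i in range(H)))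
--     total = 0
--     for i in range(H):
--         if any(field[i][j] == '#' for j in range(W)):
--             total += W
--         else:
--             total += c
--     return total
-- ===== Notes on version B (the rewrite author's own statement) =====
-- stated objective: alternative
-- what changed: B builds no sets and uses no inclusion-exclusion formula: after an early 0 for an empty grid, it counts bomb columns with a column-major any-pass and then sums per-row contributions (W for a row containing a bomb, the bomb-column count otherwise).
import Mathlib
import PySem

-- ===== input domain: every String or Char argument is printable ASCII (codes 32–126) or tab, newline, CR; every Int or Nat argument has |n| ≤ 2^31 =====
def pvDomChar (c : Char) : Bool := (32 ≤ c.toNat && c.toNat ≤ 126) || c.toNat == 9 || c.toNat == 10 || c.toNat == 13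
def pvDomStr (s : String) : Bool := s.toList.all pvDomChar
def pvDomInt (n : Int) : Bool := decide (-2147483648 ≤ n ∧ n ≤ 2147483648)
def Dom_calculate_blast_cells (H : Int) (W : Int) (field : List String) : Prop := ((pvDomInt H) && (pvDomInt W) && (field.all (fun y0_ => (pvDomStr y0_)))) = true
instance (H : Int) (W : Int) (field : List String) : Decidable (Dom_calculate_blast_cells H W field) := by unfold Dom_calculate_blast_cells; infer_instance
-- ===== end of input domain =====

-- B drops A's sets and inclusion-exclusion formula: it counts bomb columns by a column-major pass
-- and sums per-row contributions (W for a bomb row, the bomb-column count otherwise); same cost, different algorithm.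


-- ===== PORT A =====
-- field[i][j], totalised with defaults; under Pre_ every evaluated access is in range
def pvCellA (field : List String) (i j : Int) : Char :=
  (PySem.Str.pyGet? (PySem.List.pyGetD field i "") j).getD ' '

-- the scan building the pair bomb_rows × bomb_cols
def pvScanA (H : Int) (W : Int) (field : List String) : PySem.Set Int × PySem.Set Int :=
  (PySem.List.pyRange 0 H 1).foldl (fun st i =>
    (PySem.List.pyRange 0 W 1).foldl (fun st j =>
      if pvCellA field i j == '#' then (PySem.Set.add st.1 i, PySem.Set.add st.2 j) else st) st)
    (PySem.Set.empty, PySem.Set.empty)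

def calculate_blast_cells (H : Int) (W : Int) (field : List String) : Int :=
  ((pvScanA H W field).1.length : Int) * W + ((pvScanA H W field).2.length : Int) * H
    - ((pvScanA H W field).1.length : Int) * ((pvScanA H W field).2.length : Int)

-- ===== PORT B =====
def pvCellB (field : List String) (i j : Int) : Char :=
  (PySem.Str.pyGet? (PySem.List.pyGetD field i "") j).getD ' '

-- c = sum(1 for j in range(W) if any(field[i][j] == '#' for i in range(H)))
def pvBombColsB (H : Int) (W : Int) (field : List String) : Int :=
  ((PySem.List.pyRange 0 W 1).countP (fun j =>
    (PySem.List.pyRange 0 H 1).any (fun i => pvCellB field i j == '#')) : Int)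

def calculate_blast_cells_alt (H : Int) (W : Int) (field : List String) : Int :=
  if H ≤ 0 ∨ W ≤ 0 then 0
  else
    (PySem.List.pyRange 0 H 1).foldl (fun total i =>
      if (PySem.List.pyRange 0 W 1).any (fun j => pvCellB field i j == '#')
      then total + W else total + pvBombColsB H W field) 0

-- ===== PRECONDITION & SPEC =====
-- A raises IndexError when some accessed cell is out of range: Pre_ is exactly where A returns
-- (if W ≤ 0 the inner loop body never runs, so no access happens at all).
def Pre_calculate_blast_cells (H : Int) (W : Int) (field : List String) : Prop :=
  W ≤ 0 ∨ (H ≤ (field.length : Int) ∧ ∀ s ∈ field.take H.toNat, W ≤ (s.toList.length : Int))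
instance (H : Int) (W : Int) (field : List String) : Decidable (Pre_calculate_blast_cells H W field) := by
  unfold Pre_calculate_blast_cells; infer_instance

def pvWitness_calculate_blast_cells : Int × Int × List String := (2, 3, ["#..", "..."])

def Spec_calculate_blast_cells (H : Int) (W : Int) (field : List String) (out : Int) : Prop := out = calculate_blast_cells_alt H W field
instance (H : Int) (W : Int) (field : List String) (out : Int) : Decidable (Spec_calculate_blast_cells H W field out) := by unfold Spec_calculate_blast_cells; infer_instance

-- ===== CLAIM (what is proved, stated in full; the proofs are below) =====
def Claim_equal_calculate_blast_cells : Prop := ∀ (H : Int) (W : Int) (field : List String), Dom_calculate_blast_cells H W field → Pre_calculate_blast_cells H W field → Spec_calculate_blast_cells H W field (calculate_blast_cells H W field)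

-- ===== LEMMAS AND PROOFS =====

-- membership characterisation of the inner fold of A's scan
lemma pv_inner_mem (cond : Int → Int → Bool) (i : Int) :
    ∀ (js : List Int) (st : List Int × List Int),
      (∀ x, (x ∈ (js.foldl (fun st j =>
          if cond i j then (PySem.Set.add st.1 i, PySem.Set.add st.2 j) else st) st).1
        ↔ x ∈ st.1 ∨ (x = i ∧ ∃ j ∈ js, cond i j))) ∧
      (∀ y, (y ∈ (js.foldl (fun st j =>
          if cond i j then (PySem.Set.add st.1 i, PySem.Set.add st.2 j) else st) st).2
        ↔ y ∈ st.2 ∨ (y ∈ js ∧ cond i y))) := by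
  intro js
  induction js with
  | nil => intro st; constructor <;> intro x <;> simp
  | cons j jt ih =>
    intro st
    simp only [List.foldl_cons]
    by_cases h : cond i j = true
    · simp only [h, if_pos]
      obtain ⟨ih1, ih2⟩ := ih (PySem.Set.add st.1 i, PySem.Set.add st.2 j)
      constructor
      · intro x
        rw [ih1]; simp only [PySem.Set.mem_add, List.mem_cons]
        constructor
        · rintro ((hx | rfl) | ⟨rfl, jj, hjj, hc⟩)
          · exact Or.inl hx
          · exact Or.inr ⟨rfl, j, Or.inl rfl, h⟩
          · exact Or.inr ⟨rfl, jj, Or.inr hjj, hc⟩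
        · rintro (hx | ⟨rfl, jj, (rfl | hjj), hc⟩)
          · exact Or.inl (Or.inl hx)
          · exact Or.inl (Or.inr rfl)
          · exact Or.inr ⟨rfl, jj, hjj, hc⟩
      · intro y
        rw [ih2]; simp only [PySem.Set.mem_add, List.mem_cons]
        constructor
        · rintro ((hy | rfl) | ⟨hy, hc⟩)
          · exact Or.inl hy
          · exact Or.inr ⟨Or.inl rfl, h⟩
          · exact Or.inr ⟨Or.inr hy, hc⟩
        · rintro (hy | ⟨(rfl | hy), hc⟩)
          · exact Or.inl (Or.inl hy)
          · exact Or.inl (Or.inr rfl)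
          · exact Or.inr ⟨hy, hc⟩
    · simp only [h, if_neg, Bool.false_eq_true, not_false_iff]
      obtain ⟨ih1, ih2⟩ := ih st
      constructor
      · intro x
        rw [ih1]
        constructor
        · rintro (hx | ⟨rfl, jj, hjj, hc⟩)
          · exact Or.inl hx
          · exact Or.inr ⟨rfl, jj, List.mem_cons_of_mem _ hjj, hc⟩
        · rintro (hx | ⟨rfl, jj, hjj, hc⟩)
          · exact Or.inl hx
          · rcases List.mem_cons.1 hjj with rfl | hjj
            · exact absurd hc h
            · exact Or.inr ⟨rfl, jj, hjj, hc⟩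
      · intro y
        rw [ih2]
        constructor
        · rintro (hy | ⟨hy, hc⟩)
          · exact Or.inl hy
          · exact Or.inr ⟨List.mem_cons_of_mem _ hy, hc⟩
        · rintro (hy | ⟨hy, hc⟩)
          · exact Or.inl hy
          · rcases List.mem_cons.1 hy with rfl | hy
            · exact absurd hc h
            · exact Or.inr ⟨hy, hc⟩

-- membership characterisation of the whole scan
lemma pv_outer_mem (cond : Int → Int → Bool) (js : List Int) :
    ∀ (is : List Int) (st : List Int × List Int),
      (∀ x, (x ∈ (is.foldl (fun st i => js.foldl (fun st j =>
          if cond i j then (PySem.Set.add st.1 i, PySem.Set.add st.2 j) else st) st) st).1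
        ↔ x ∈ st.1 ∨ (x ∈ is ∧ ∃ j ∈ js, cond x j))) ∧
      (∀ y, (y ∈ (is.foldl (fun st i => js.foldl (fun st j =>
          if cond i j then (PySem.Set.add st.1 i, PySem.Set.add st.2 j) else st) st) st).2
        ↔ y ∈ st.2 ∨ (y ∈ js ∧ ∃ i ∈ is, cond i y))) := by
  intro is
  induction is with
  | nil => intro st; constructor <;> intro x <;> simp
  | cons i it ih =>
    intro st
    simp only [List.foldl_cons]
    obtain ⟨ih1, ih2⟩ := ih (js.foldl (fun st j =>
      if cond i j then (PySem.Set.add st.1 i, PySem.Set.add st.2 j) else st) st)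
    obtain ⟨in1, in2⟩ := pv_inner_mem cond i js st
    constructor
    · intro x
      rw [ih1, in1]
      constructor
      · rintro ((hx | ⟨rfl, hj⟩) | ⟨hx, hj⟩)
        · exact Or.inl hx
        · exact Or.inr ⟨List.mem_cons_self, hj⟩
        · exact Or.inr ⟨List.mem_cons_of_mem _ hx, hj⟩
      · rintro (hx | ⟨hx, hj⟩)
        · exact Or.inl (Or.inl hx)
        · rcases List.mem_cons.1 hx with rfl | hx
          · exact Or.inl (Or.inr ⟨rfl, hj⟩)
          · exact Or.inr ⟨hx, hj⟩
    · intro y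
      rw [ih2, in2]
      constructor
      · rintro ((hy | ⟨hy, hc⟩) | ⟨hy, i', hi', hc⟩)
        · exact Or.inl hy
        · exact Or.inr ⟨hy, i, List.mem_cons_self, hc⟩
        · exact Or.inr ⟨hy, i', List.mem_cons_of_mem _ hi', hc⟩
      · rintro (hy | ⟨hy, i', hi', hc⟩)
        · exact Or.inl (Or.inl hy)
        · rcases List.mem_cons.1 hi' with rfl | hi'
          · exact Or.inl (Or.inr ⟨hy, hc⟩)
          · exact Or.inr ⟨hy, i', hi', hc⟩

lemma pv_scan_mem (H W : Int) (field : List String) :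
    (∀ x, (x ∈ (pvScanA H W field).1 ↔ (0 ≤ x ∧ x < H) ∧
        ∃ j, (0 ≤ j ∧ j < W) ∧ pvCellA field x j == '#')) ∧
    (∀ y, (y ∈ (pvScanA H W field).2 ↔ (0 ≤ y ∧ y < W) ∧
        ∃ i, (0 ≤ i ∧ i < H) ∧ pvCellA field i y == '#')) := by
  obtain ⟨h1, h2⟩ := pv_outer_mem (fun i j => pvCellA field i j == '#')
    (PySem.List.pyRange 0 W 1) (PySem.List.pyRange 0 H 1) (PySem.Set.empty, PySem.Set.empty)
  constructor
  · intro x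
    have := h1 x
    simpa [pvScanA, PySem.Set.empty, PySem.List.mem_pyRange_one] using this
  · intro y
    have := h2 y
    simpa [pvScanA, PySem.Set.empty, PySem.List.mem_pyRange_one] using this

-- Nodup of the two scan components
lemma pv_inner_nodup (cond : Int → Int → Bool) (i : Int) :
    ∀ (js : List Int) (st : List Int × List Int), st.1.Nodup → st.2.Nodup →
      ((js.foldl (fun st j =>
        if cond i j then (PySem.Set.add st.1 i, PySem.Set.add st.2 j) else st) st).1.Nodup ∧
       (js.foldl (fun st j =>
        if cond i j then (PySem.Set.add st.1 i, PySem.Set.add st.2 j) else st) st).2.Nodup) := by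
  intro js
  induction js with
  | nil => intro st h1 h2; exact ⟨h1, h2⟩
  | cons j jt ih =>
    intro st h1 h2
    simp only [List.foldl_cons]
    split
    · exact ih _ (PySem.Set.nodup_add _ _ h1) (PySem.Set.nodup_add _ _ h2)
    · exact ih st h1 h2

lemma pv_outer_nodup (cond : Int → Int → Bool) (js : List Int) :
    ∀ (is : List Int) (st : List Int × List Int), st.1.Nodup → st.2.Nodup →
      ((is.foldl (fun st i => js.foldl (fun st j =>
        if cond i j then (PySem.Set.add st.1 i, PySem.Set.add st.2 j) else st) st) st).1.Nodup ∧
       (is.foldl (fun st i => js.foldl (fun st j =>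
        if cond i j then (PySem.Set.add st.1 i, PySem.Set.add st.2 j) else st) st) st).2.Nodup) := by
  intro is
  induction is with
  | nil => intro st h1 h2; exact ⟨h1, h2⟩
  | cons i it ih =>
    intro st h1 h2
    simp only [List.foldl_cons]
    obtain ⟨n1, n2⟩ := pv_inner_nodup cond i js st h1 h2
    exact ih _ n1 n2

lemma pv_scan_nodup (H W : Int) (field : List String) :
    (pvScanA H W field).1.Nodup ∧ (pvScanA H W field).2.Nodup := by
  unfold pvScanA
  exact pv_outer_nodup _ _ _ _ List.nodup_nil List.nodup_nil

-- countP of membership in a nodup sub-collection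
lemma pv_countP_mem (C l : List Int) (hC : C.Nodup) (hl : l.Nodup) (hsub : ∀ x ∈ C, x ∈ l) :
    l.countP (fun j => C.contains j) = C.length := by
  rw [List.countP_eq_length_filter]
  have hperm : (l.filter (fun j => C.contains j)).Perm C := by
    rw [List.perm_ext_iff_of_nodup (hl.filter _) hC]
    intro a
    simp only [List.mem_filter, List.contains_iff_mem]
    exact ⟨fun h => h.2, fun h => ⟨hsub a h, h⟩⟩
  exact hperm.length_eq

lemma pv_sum_ite (q : Int → Bool) (a b : Int) :
    ∀ (l : List Int), (l.map (fun i => if q i then a else b)).sum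
      = (l.countP q : Int) * a + ((l.length : Int) - (l.countP q : Int)) * b := by
  intro l
  induction l with
  | nil => simp
  | cons x l ih =>
    simp only [List.map_cons, List.sum_cons, ih, List.countP_cons, List.length_cons]
    by_cases h : q x = true <;> simp [h] <;> ring

-- ===== VERDICT (by name: the statement is the Claim_ definition above) =====
theorem calculate_blast_cells_spec : Claim_equal_calculate_blast_cells := by
  intro H W field _ _
  unfold Spec_calculate_blast_cells calculate_blast_cells calculate_blast_cells_alt pvBombColsB
  obtain ⟨hm1, hm2⟩ := pv_scan_mem H W field
  obtain ⟨hn1, hn2⟩ := pv_scan_nodup H W field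
  set R := (pvScanA H W field).1 with hRdef
  set C := (pvScanA H W field).2 with hCdef
  have hcellBA : pvCellB = pvCellA := rfl
  have hRnilOf : ∀ x ∈ R, 0 < H ∧ 0 < W := fun x hx => by
    obtain ⟨⟨h1, h2⟩, j, ⟨h3, h4⟩, -⟩ := (hm1 x).1 hx; exact ⟨by omega, by omega⟩
  have hCnilOf : ∀ y ∈ C, 0 < H ∧ 0 < W := fun y hy => by
    obtain ⟨⟨h1, h2⟩, i, ⟨h3, h4⟩, -⟩ := (hm2 y).1 hy; exact ⟨by omega, by omega⟩
  by_cases hdeg : H ≤ 0 ∨ W ≤ 0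
  · rw [if_pos hdeg]
    have hRnil : R = [] := by
      cases hReq : R with
      | nil => rfl
      | cons x xs =>
        have := hRnilOf x (by rw [hReq]; exact List.mem_cons_self)
        omega
    have hCnil : C = [] := by
      cases hCeq : C with
      | nil => rfl
      | cons y ys =>
        have := hCnilOf y (by rw [hCeq]; exact List.mem_cons_self)
        omega
    rw [hRnil, hCnil]; simp
  push_neg at hdeg
  rw [if_neg (by omega : ¬ (H ≤ 0 ∨ W ≤ 0))]
  have hsubC : ∀ y ∈ C, y ∈ PySem.List.pyRange 0 W 1 := fun y hy => by
    rw [PySem.List.mem_pyRange_one]; exact ((hm2 y).1 hy).1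
  have hsubR : ∀ x ∈ R, x ∈ PySem.List.pyRange 0 H 1 := fun x hx => by
    rw [PySem.List.mem_pyRange_one]; exact ((hm1 x).1 hx).1
  -- the column-major any agrees with membership in C on range W
  have hcolpred : ∀ j ∈ PySem.List.pyRange 0 W 1,
      ((PySem.List.pyRange 0 H 1).any (fun i => pvCellB field i j == '#')) = C.contains j := by
    intro j hj
    rw [hcellBA, PySem.List.mem_pyRange_one] at *
    by_cases h : j ∈ C
    · obtain ⟨-, i, hi, hci⟩ := (hm2 j).1 h
      have hany : (PySem.List.pyRange 0 H 1).any (fun i => pvCellA field i j == '#') = true :=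
        List.any_eq_true.2 ⟨i, by rw [PySem.List.mem_pyRange_one]; exact hi, hci⟩
      rw [hany]; simp [h]
    · have hany : (PySem.List.pyRange 0 H 1).any (fun i => pvCellA field i j == '#') = false := by
        rw [List.any_eq_false]
        intro i hi hci
        rw [PySem.List.mem_pyRange_one] at hi
        exact h ((hm2 j).2 ⟨hj, i, hi, hci⟩)
      rw [hany]
      simp [h]
  -- B's bomb-column count equals |C|
  have hc : ((PySem.List.pyRange 0 W 1).countP (fun j =>
      (PySem.List.pyRange 0 H 1).any (fun i => pvCellB field i j == '#'))) = C.length := by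
    have hcg : (PySem.List.pyRange 0 W 1).countP (fun j =>
        (PySem.List.pyRange 0 H 1).any (fun i => pvCellB field i j == '#'))
        = (PySem.List.pyRange 0 W 1).countP (fun j => C.contains j) :=
      List.countP_congr (fun j hj => by rw [hcolpred j hj])
    rw [hcg]
    exact pv_countP_mem C _ hn2 (PySem.List.nodup_pyRange_one 0 W) hsubC
  -- the row-major any agrees with membership in R on range H
  have hrowpred : ∀ i ∈ PySem.List.pyRange 0 H 1,
      ((PySem.List.pyRange 0 W 1).any (fun j => pvCellB field i j == '#')) = R.contains i := by
    intro i hi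
    rw [hcellBA, PySem.List.mem_pyRange_one] at *
    by_cases h : i ∈ R
    · obtain ⟨-, j, hj, hci⟩ := (hm1 i).1 h
      have hany : (PySem.List.pyRange 0 W 1).any (fun j => pvCellA field i j == '#') = true :=
        List.any_eq_true.2 ⟨j, by rw [PySem.List.mem_pyRange_one]; exact hj, hci⟩
      rw [hany]; simp [h]
    · have hany : (PySem.List.pyRange 0 W 1).any (fun j => pvCellA field i j == '#') = false := by
        rw [List.any_eq_false]
        intro j hj hci
        rw [PySem.List.mem_pyRange_one] at hj
        exact h ((hm1 i).2 ⟨hi, j, hj, hci⟩)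
      rw [hany]; simp [h]
  -- turn B's fold into a sum over range H
  have hfold : (PySem.List.pyRange 0 H 1).foldl (fun total i =>
      if (PySem.List.pyRange 0 W 1).any (fun j => pvCellB field i j == '#')
      then total + W else total + (C.length : Int)) 0
      = ((PySem.List.pyRange 0 H 1).map (fun i =>
          if R.contains i then W else (C.length : Int))).sum := by
    rw [PySem.List.foldl_congr_mem (PySem.List.pyRange 0 H 1) _
        (fun total i => total + (if R.contains i then W else (C.length : Int))) 0
        (fun acc x hx => by
          rw [hrowpred x hx]
          by_cases hm : x ∈ R <;> simp [hm])]
    rw [PySem.List.foldl_add]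
    simp
  rw [hc, hfold, pv_sum_ite]
  have hcntR : (PySem.List.pyRange 0 H 1).countP (fun i => R.contains i) = R.length :=
    pv_countP_mem R _ hn1 (PySem.List.nodup_pyRange_one 0 H) hsubR
  rw [hcntR, PySem.List.length_pyRange_one]
  have h1 : ((H - 0).toNat : Int) = H := by omega
  rw [h1]; ring
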